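-- pv_equiv track=rewrite | github.com/Shivampanwar/algo-ds | Dynamic Programming/coin tower.py | properdp
-- ===== SOURCE A (Python) =====
-- def properdp(n, x, y):
--     dp = [0 for i in range(n + 1)]
--     dp[0] = False
--     dp[1] = True
--     for i in range(2, n + 1):
--         if i - 1 >= 0 and not dp[i - 1]:
--             dp[i] = True
--         elif (i - x >= 0 and not dp[i - x]):
--             dp[i] = True
--         elif (i - y >= 0 and not dp[i - y]):
--             dp[i] = True
--
--         # Else A loses game.
--         else:
--             dp[i] = False
--     return dp[-1]
-- ===== SOURCE B (Python) =====
-- def properdp(n, x, y):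
--     # Win/lose result for the coin-tower game with moves {1, x, y}, computed by
--     # cycle detection: the sequence of win/lose values is determined by the window
--     # of its last m = max(x, y) values, so once a window repeats the sequence is
--     # periodic and dp[n] can be read off by modular indexing.  Windows are kept as
--     # an m-bit integer updated in O(1) per step.
--     m = max(x, y)
--     seq = [False, True]          # dp[0], dp[1]
--     seen = {}                    # window bitmask -> index where that window ended
--     mask = None
--     w = 0
--     i = 2
--     while i <= n:
--         if i >= m + 1:
--             if mask is None:     # first window available: pack seq[i-m:i] once
--                 mask = (1 << m) - 1
--                 for v in seq[i - m:i]: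
--                     w = (w << 1) | v
--             j = seen.get(w)
--             if j is not None:
--                 return seq[j + (n - j) % (i - j)]
--             seen[w] = i
--         v = (not seq[i - 1]) or (x <= i and not seq[i - x]) or (y <= i and not seq[i - y])
--         seq.append(v)
--         if mask is not None:
--             w = ((w << 1) | v) & mask
--         i += 1
--     return seq[n]
-- ===== Notes on version B (the rewrite author's own statement) =====
-- stated objective: alternative
-- what changed: Replaces A's full DP table walk to n with cycle detection: the win/lose sequence is determined by the window of its last max(x,y) values (kept as a rolling bitmask), so B records windows, and on the first repeated window answers dp[n] by modular indexing into one period instead of computing on to n.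
-- outside the precondition, e.g. on properdp(6, 9, 0): A returns True, B raises IndexError; on properdp(177, 0, -7): A returns True, B raises IndexError; on properdp(-5, 2, 3): A raises IndexError, B raises IndexError
import Mathlib
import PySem

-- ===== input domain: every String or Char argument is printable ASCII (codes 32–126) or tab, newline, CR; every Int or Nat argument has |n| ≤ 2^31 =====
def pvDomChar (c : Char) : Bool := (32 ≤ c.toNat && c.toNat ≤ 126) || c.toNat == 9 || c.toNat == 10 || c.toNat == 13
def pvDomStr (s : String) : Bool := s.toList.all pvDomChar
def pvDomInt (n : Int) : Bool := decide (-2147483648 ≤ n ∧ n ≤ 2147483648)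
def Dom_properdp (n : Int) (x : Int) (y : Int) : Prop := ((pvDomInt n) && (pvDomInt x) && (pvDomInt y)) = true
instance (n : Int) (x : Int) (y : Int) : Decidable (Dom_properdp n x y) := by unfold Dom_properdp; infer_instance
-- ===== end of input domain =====

-- B replaces A's straight DP table walk by a different algorithm: cycle detection on the
-- bitmask-encoded window of the last max(x,y) values, answering dp[n] by modular indexing
-- into one period when a window repeats (alternative; not measured faster on the timed inputs).

-- ===== PORT A =====
-- the body of A's loop for i = len(dp); exact on Pre_ (1 ≤ x, 1 ≤ y, so every
-- index actually read is in range and the getD default is never used)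
def properdpStep (x : Int) (y : Int) (dp : List Bool) : Bool :=
  let i : Int := (dp.length : Int)
  if (decide (i - 1 ≥ 0) && !((PySem.List.pyGet? dp (i - 1)).getD false)) = true then true
  else if (decide (i - x ≥ 0) && !((PySem.List.pyGet? dp (i - x)).getD false)) = true then true
  else if (decide (i - y ≥ 0) && !((PySem.List.pyGet? dp (i - y)).getD false)) = true then true
  else false

-- 'for i in range(2, n + 1)': one iteration appends dp[i]
def properdpGo (x : Int) (y : Int) (dp : List Bool) : Nat → List Bool
  | 0 => dp
  | fuel + 1 => properdpGo x y (dp ++ [properdpStep x y dp]) fuel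

def properdp (n : Int) (x : Int) (y : Int) : Bool :=
  let dp : List Bool := [false, true]          -- dp[0] = False, dp[1] = True
  let dp := properdpGo x y dp (n - 1).toNat    -- iterations of range(2, n+1)
  (PySem.List.pyGet? dp (-1)).getD false       -- dp[-1]

-- ===== PORT B =====
-- v = (not seq[i-1]) or (x <= i and not seq[i-x]) or (y <= i and not seq[i-y]);
-- indices are Nats, exact on Pre_ where x, y ≥ 1
def properdpAltStep (a : Nat) (b : Nat) (seq : List Bool) (i : Nat) : Bool :=
  (!seq.getD (i - 1) false)
  || (decide (a ≤ i) && !seq.getD (i - a) false)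
  || (decide (b ≤ i) && !seq.getD (i - b) false)

-- the 'while i <= n' loop; fuel = n + 1 - i, so fuel 0 means the loop is done.
-- mask? is Python's 'mask' with None; the two matches on it are the 'if mask is None' pack
-- (seq[i-m:i] is drop (i-m), exact since len(seq) = i) and w is the rolling window bitmask.
def properdpAltGo (a : Nat) (b : Nat) (m : Nat) (nI : Int) (N : Nat) (seq : List Bool)
    (seen : PySem.Dict Nat Nat) (mask? : Option Nat) (w : Nat) (i : Nat) : Nat → Bool
  | 0 => (PySem.List.pyGet? seq nI).getD false  -- return seq[n] (exact incl. Python's negative n)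
  | fuel + 1 =>
    if m + 1 ≤ i then
      let mask : Nat := match mask? with
        | none => 2 ^ m - 1
        | some mk => mk
      let wc : Nat := match mask? with
        | none => (seq.drop (i - m)).foldl (fun acc v => 2 * acc + v.toNat) w
        | some _ => w
      match seen.get? wc with
      | some j => seq.getD (j + (N - j) % (i - j)) false   -- return seq[j + (n-j) % p]
      | none =>
        let v := properdpAltStep a b seq i
        properdpAltGo a b m nI N (seq ++ [v]) (seen.insert wc i)
          (some mask) ((2 * wc + v.toNat) &&& mask) (i + 1) fuel
    else
      let v := properdpAltStep a b seq i
      properdpAltGo a b m nI N (seq ++ [v]) seen mask? w (i + 1) fuel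

def properdp_alt (n : Int) (x : Int) (y : Int) : Bool :=
  let N : Nat := n.toNat
  let a : Nat := x.toNat
  let b : Nat := y.toNat
  let m : Nat := max a b
  properdpAltGo a b m n N [false, true] PySem.Dict.empty none 0 2 (N + 1 - 2)

-- ===== PRECONDITION & SPEC =====
-- Pre_ excludes n < 1, where A raises IndexError while initialising dp, and (for n ≥ 2)
-- non-positive move sizes x ≤ 0 or y ≤ 0, where A's returned value comes from reading
-- preallocated 0 cells of dp that were never assigned — an artefact of its implementation —
-- and B's own algorithm raises IndexError.
def Pre_properdp (n : Int) (x : Int) (y : Int) : Prop := 1 ≤ n ∧ (n = 1 ∨ (1 ≤ x ∧ 1 ≤ y))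
instance (n : Int) (x : Int) (y : Int) : Decidable (Pre_properdp n x y) := by
  unfold Pre_properdp; infer_instance
def pvWitness_properdp : Int × Int × Int := (7, 2, 3)

def Spec_properdp (n : Int) (x : Int) (y : Int) (out : Bool) : Prop := out = properdp_alt n x y
instance (n : Int) (x : Int) (y : Int) (out : Bool) : Decidable (Spec_properdp n x y out) := by
  unfold Spec_properdp; infer_instance

-- ===== CLAIM (what is proved, stated in full; the proofs are below) =====
def Claim_equal_properdp : Prop := ∀ (n : Int) (x : Int) (y : Int),
  Dom_properdp n x y → Pre_properdp n x y → Spec_properdp n x y (properdp n x y)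
-- ===== LEMMAS AND PROOFS =====

-- the win/lose sequence both programs compute: pvF i = "first player wins a tower of i"
def pvF (a : Nat) (b : Nat) (i : Nat) : Bool :=
  if h0 : i = 0 then false
  else if h1 : i = 1 then true
  else
    (!pvF a b (i - 1))
    || (if h : 1 ≤ a ∧ a ≤ i then !pvF a b (i - a) else false)
    || (if h : 1 ≤ b ∧ b ≤ i then !pvF a b (i - b) else false)
termination_by i
decreasing_by all_goals omega

lemma pvF_eq (a b i : Nat) (ha : 1 ≤ a) (hb : 1 ≤ b) (hi : 2 ≤ i) :
    pvF a b i = ((!pvF a b (i - 1))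
      || (decide (a ≤ i) && !pvF a b (i - a))
      || (decide (b ≤ i) && !pvF a b (i - b))) := by
  rw [pvF]
  have h0 : ¬ i = 0 := by omega
  have h1 : ¬ i = 1 := by omega
  simp only [h0, h1, dite_false, dif_neg]
  by_cases hai : a ≤ i <;> by_cases hbi : b ≤ i <;>
    simp [hai, hbi, ha, hb]


-- ===== A-side and B-side characterisation via pvF =====

lemma pvMapRange_getD (g : Nat → Bool) {t k : Nat} (h : t < k) :
    ((List.range k).map g).getD t false = g t := by
  rw [List.getD_eq_getElem?_getD]
  simp [List.getElem?_map, List.getElem?_range, h]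

lemma pvF_zero (a b : Nat) : pvF a b 0 = false := by rw [pvF]; simp

lemma pvF_one (a b : Nat) : pvF a b 1 = true := by rw [pvF]; simp

lemma pvF_init (a b : Nat) : [false, true] = (List.range 2).map (pvF a b) := by
  simp [List.range_succ, pvF_zero, pvF_one]

lemma pvIte_or (c1 c2 c3 : Bool) :
    (if c1 = true then true else if c2 = true then true else if c3 = true then true else false)
      = (c1 || c2 || c3) := by
  cases c1 <;> cases c2 <;> cases c3 <;> simp

lemma pvStepA (a b : Nat) (ha : 1 ≤ a) (hb : 1 ≤ b) (k : Nat) (hk : 2 ≤ k) :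
    properdpStep (a : Int) (b : Int) ((List.range k).map (pvF a b)) = pvF a b k := by
  have hlen : (((List.range k).map (pvF a b)).length : Int) = (k : Int) := by simp
  have hget : ∀ t : Nat, t < k →
      PySem.List.pyGet? ((List.range k).map (pvF a b)) (t : Int) = some (pvF a b t) := by
    intro t ht
    rw [PySem.List.pyGet?_natCast]
    simp [List.getElem?_map, List.getElem?_range, ht]
  simp only [properdpStep, hlen, pvIte_or]
  have e1 : (k : Int) - 1 = ((k - 1 : Nat) : Int) := by omega
  have c1 : decide (((k - 1 : Nat) : Int) ≥ 0) = true := by simp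
  rw [e1, c1, hget (k - 1) (by omega)]
  rw [pvF_eq a b k ha hb hk]
  by_cases hak : a ≤ k
  · have e2 : (k : Int) - (a : Int) = ((k - a : Nat) : Int) := by omega
    have c2 : decide (((k - a : Nat) : Int) ≥ 0) = true := by simp
    rw [e2, c2, hget (k - a) (by omega)]
    by_cases hbk : b ≤ k
    · have e3 : (k : Int) - (b : Int) = ((k - b : Nat) : Int) := by omega
      have c3 : decide ((k : Int) - (b : Int) ≥ 0) = true := by simp; omega
      rw [e3] at c3 ⊢
      rw [c3, hget (k - b) (by omega)]
      simp [hak, hbk]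
    · have c3 : decide ((k : Int) - (b : Int) ≥ 0) = false := by simp; omega
      rw [c3]
      simp [hak, hbk]
  · have c2 : decide ((k : Int) - (a : Int) ≥ 0) = false := by simp; omega
    rw [c2]
    by_cases hbk : b ≤ k
    · have e3 : (k : Int) - (b : Int) = ((k - b : Nat) : Int) := by omega
      have c3 : decide ((k : Int) - (b : Int) ≥ 0) = true := by simp; omega
      rw [e3] at c3 ⊢
      rw [c3, hget (k - b) (by omega)]
      simp [hak, hbk]
    · have c3 : decide ((k : Int) - (b : Int) ≥ 0) = false := by simp; omega
      rw [c3]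
      simp [hak, hbk]

lemma pvGoA (a b : Nat) (ha : 1 ≤ a) (hb : 1 ≤ b) :
    ∀ (fuel k : Nat), 2 ≤ k →
      properdpGo (a : Int) (b : Int) ((List.range k).map (pvF a b)) fuel
        = (List.range (k + fuel)).map (pvF a b) := by
  intro fuel
  induction fuel with
  | zero => intro k hk; simp [properdpGo]
  | succ f ih =>
    intro k hk
    rw [properdpGo, pvStepA a b ha hb k hk]
    have h : (List.range k).map (pvF a b) ++ [pvF a b k] = (List.range (k + 1)).map (pvF a b) := by
      simp [List.range_succ]
    rw [h, ih (k + 1) (by omega)]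
    congr 2
    omega

lemma pvA_val (n x y : Int) (hn : 1 ≤ n) (hx : 1 ≤ x) (hy : 1 ≤ y) :
    properdp n x y = pvF x.toNat y.toNat n.toNat := by
  have hx' : x = (x.toNat : Int) := by omega
  have hy' : y = (y.toNat : Int) := by omega
  simp only [properdp]
  rw [hx', hy', pvF_init x.toNat y.toNat,
    pvGoA x.toNat y.toNat (by omega) (by omega) (n - 1).toNat 2 (by omega)]
  have h : 2 + (n - 1).toNat = n.toNat + 1 := by omega
  rw [h, PySem.List.pyGet?_neg_one, List.range_succ, List.map_append]
  simp
  congr 1 <;> omega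

-- windows: seq[i-m:i] of the sequence of length i
lemma pvWindow (g : Nat → Bool) (i m : Nat) (h : m ≤ i) :
    ((List.range i).map g).drop (i - m) = (List.range m).map (fun k => g (i - m + k)) := by
  apply List.ext_getElem
  · simp; omega
  · intro t h1 h2
    simp only [List.getElem_drop, List.getElem_map, List.getElem_range]

-- once a window of size m repeats, the sequence is periodic from there on
lemma pvPer (a b m j p : Nat) (ha : 1 ≤ a) (hb : 1 ≤ b) (ham : a ≤ m) (hbm : b ≤ m)
    (hj : m + 1 ≤ j) (hp : 1 ≤ p)
    (hw : ∀ k, k < m → pvF a b (j - m + k) = pvF a b (j - m + k + p)) :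
    ∀ t, j - m ≤ t → pvF a b (t + p) = pvF a b t := by
  intro t
  induction t using Nat.strong_induction_on with
  | _ t ih =>
    intro ht
    by_cases htj : t < j
    · have hk : t - (j - m) < m := by omega
      have h := hw (t - (j - m)) hk
      have he : j - m + (t - (j - m)) = t := by omega
      rw [he] at h
      exact h.symm
    · replace htj : j ≤ t := by omega
      rw [pvF_eq a b (t + p) ha hb (by omega), pvF_eq a b t ha hb (by omega)]
      have e1 : t + p - 1 = (t - 1) + p := by omega
      have e2 : t + p - a = (t - a) + p := by omega
      have e3 : t + p - b = (t - b) + p := by omega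
      rw [e1, e2, e3, ih (t - 1) (by omega) (by omega), ih (t - a) (by omega) (by omega),
        ih (t - b) (by omega) (by omega)]
      simp [show a ≤ t + p by omega, show a ≤ t by omega,
        show b ≤ t + p by omega, show b ≤ t by omega]

lemma pvPerMul (a b m j p : Nat) (ha : 1 ≤ a) (hb : 1 ≤ b) (ham : a ≤ m) (hbm : b ≤ m)
    (hj : m + 1 ≤ j) (hp : 1 ≤ p)
    (hw : ∀ k, k < m → pvF a b (j - m + k) = pvF a b (j - m + k + p)) :
    ∀ (q t : Nat), j - m ≤ t → pvF a b (t + q * p) = pvF a b t := by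
  intro q
  induction q with
  | zero => intro t _; simp
  | succ q ih =>
    intro t ht
    have h : t + (q + 1) * p = (t + q * p) + p := by ring
    rw [h, pvPer a b m j p ha hb ham hbm hj hp hw (t + q * p) (by omega), ih t ht]

lemma pvStepB (a b : Nat) (ha : 1 ≤ a) (hb : 1 ≤ b) (i : Nat) (hi : 2 ≤ i) :
    properdpAltStep a b ((List.range i).map (pvF a b)) i = pvF a b i := by
  simp only [properdpAltStep]
  rw [pvMapRange_getD (pvF a b) (show i - 1 < i by omega),
    pvMapRange_getD (pvF a b) (show i - a < i by omega),
    pvMapRange_getD (pvF a b) (show i - b < i by omega),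
    pvF_eq a b i ha hb hi]

-- the window bitmask encoding and its properties
def pvEnc (l : List Bool) : Nat := l.foldl (fun acc v => 2 * acc + v.toNat) 0

lemma pvEnc_foldl (l : List Bool) : ∀ acc : Nat,
    l.foldl (fun acc v => 2 * acc + v.toNat) acc = acc * 2 ^ l.length + pvEnc l := by
  induction l with
  | nil => intro acc; simp [pvEnc]
  | cons v l ih =>
    intro acc
    have h1 := ih (2 * acc + v.toNat)
    have h2 := ih v.toNat
    simp only [List.foldl_cons, List.length_cons]
    rw [h1]
    have : pvEnc (v :: l) = v.toNat * 2 ^ l.length + pvEnc l := by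
      simp only [pvEnc, List.foldl_cons]
      simpa using h2
    rw [this]
    ring

lemma pvEnc_cons (v : Bool) (l : List Bool) :
    pvEnc (v :: l) = v.toNat * 2 ^ l.length + pvEnc l := by
  simp only [pvEnc, List.foldl_cons]
  simpa using pvEnc_foldl l v.toNat

lemma pvEnc_append_singleton (l : List Bool) (v : Bool) :
    pvEnc (l ++ [v]) = 2 * pvEnc l + v.toNat := by
  simp [pvEnc, List.foldl_append]

lemma pvEnc_lt (l : List Bool) : pvEnc l < 2 ^ l.length := by
  induction l with
  | nil => simp [pvEnc]
  | cons v l ih =>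
    rw [pvEnc_cons]
    have h2 : (2 : Nat) ^ (v :: l).length = 2 * 2 ^ l.length := by
      simp [pow_succ]; ring
    simp only [List.length_cons, pow_succ] at *
    cases v <;> simp [Bool.toNat] <;> omega

lemma pvEnc_inj : ∀ (l1 l2 : List Bool), l1.length = l2.length → pvEnc l1 = pvEnc l2 → l1 = l2 := by
  intro l1
  induction l1 with
  | nil => intro l2 hl _; cases l2 <;> simp_all
  | cons v1 t1 ih =>
    intro l2 hl he
    cases l2 with
    | nil => simp at hl
    | cons v2 t2 =>
      have hlt : t1.length = t2.length := by simpa using hl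
      rw [pvEnc_cons, pvEnc_cons, hlt] at he
      have b1 := pvEnc_lt t1
      have b2 := pvEnc_lt t2
      rw [hlt] at b1
      have hv : v1 = v2 := by
        cases v1 <;> cases v2 <;> simp [Bool.toNat] at he ⊢ <;> omega
      subst hv
      have ht : pvEnc t1 = pvEnc t2 := by
        cases v1 <;> simp [Bool.toNat] at he <;> omega
      rw [ih t2 hlt ht]

-- one step of the rolling window: append the new value, drop the oldest bit
lemma pvWinShift (a b m i : Nat) (hm : 1 ≤ m) (hmi : m ≤ i) :
    (List.range m).map (fun k => pvF a b (i - m + k)) ++ [pvF a b i]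
      = pvF a b (i - m) :: (List.range m).map (fun k => pvF a b (i + 1 - m + k)) := by
  have e1 : i - m + m = i := by omega
  have h1 : (List.range m).map (fun k => pvF a b (i - m + k)) ++ [pvF a b i]
      = (List.range (m + 1)).map (fun k => pvF a b (i - m + k)) := by
    rw [List.range_succ, List.map_append, List.map_cons, List.map_nil, e1]
  rw [h1, List.range_succ_eq_map, List.map_cons, List.map_map]
  congr 1
  apply List.map_congr_left
  intro k hk
  have hkm : k < m := by simpa using hk
  have he : i - m + (k + 1) = i + 1 - m + k := by omega
  simp only [Function.comp_apply]
  rw [he]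

lemma pvEnc_roll (a b m i : Nat) (hm : 1 ≤ m) (hmi : m ≤ i) :
    (2 * pvEnc ((List.range m).map (fun k => pvF a b (i - m + k))) + (pvF a b i).toNat) &&& (2 ^ m - 1)
      = pvEnc ((List.range m).map (fun k => pvF a b (i + 1 - m + k))) := by
  rw [Nat.and_two_pow_sub_one_eq_mod, ← pvEnc_append_singleton, pvWinShift a b m i hm hmi,
    pvEnc_cons]
  have hlen : ((List.range m).map (fun k => pvF a b (i + 1 - m + k))).length = m := by simp
  have hlt := pvEnc_lt ((List.range m).map (fun k => pvF a b (i + 1 - m + k)))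
  rw [hlen] at hlt ⊢
  rw [Nat.add_comm, Nat.add_mul_mod_self_right, Nat.mod_eq_of_lt hlt]

lemma pvHit (a b m N i j : Nat) (ha : 1 ≤ a) (hb : 1 ≤ b) (ham : a ≤ m) (hbm : b ≤ m)
    (hj1 : m + 1 ≤ j) (hj2 : j < i) (hiN : i ≤ N)
    (hwj : pvEnc ((List.range m).map (fun k => pvF a b (i - m + k)))
         = pvEnc ((List.range m).map (fun k => pvF a b (j - m + k)))) :
    ((List.range i).map (pvF a b)).getD (j + (N - j) % (i - j)) false = pvF a b N := by
  have hwin : (List.range m).map (fun k => pvF a b (j - m + k))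
      = (List.range m).map (fun k => pvF a b (i - m + k)) := by
    exact pvEnc_inj _ _ (by simp) hwj.symm
  have hpt : ∀ k, k < m → pvF a b (j - m + k) = pvF a b (i - m + k) := by
    intro k hk
    have h := congrArg (fun l => l.getD k false) hwin
    simpa [List.getD_eq_getElem?_getD, List.getElem?_map, List.getElem?_range, hk] using h
  have hp : 1 ≤ i - j := by omega
  have hw : ∀ k, k < m → pvF a b (j - m + k) = pvF a b (j - m + k + (i - j)) := by
    intro k hk
    have he : j - m + k + (i - j) = i - m + k := by omega
    rw [he]
    exact hpt k hk
  have hidx : j + (N - j) % (i - j) < i := by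
    have := Nat.mod_lt (N - j) (show 0 < i - j by omega)
    omega
  rw [pvMapRange_getD (pvF a b) hidx]
  have hqr := Nat.div_add_mod (N - j) (i - j)
  have hcm : ((N - j) / (i - j)) * (i - j) = (i - j) * ((N - j) / (i - j)) := Nat.mul_comm _ _
  have hN : (j + (N - j) % (i - j)) + ((N - j) / (i - j)) * (i - j) = N := by
    rw [hcm]; omega
  calc pvF a b (j + (N - j) % (i - j))
      = pvF a b ((j + (N - j) % (i - j)) + ((N - j) / (i - j)) * (i - j)) := by
        rw [pvPerMul a b m j (i - j) ha hb ham hbm hj1 hp hw _ _ (by omega)]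
    _ = pvF a b N := by rw [hN]

lemma pvGoB (a b m N : Nat) (nI : Int) (ha : 1 ≤ a) (hb : 1 ≤ b) (ham : a ≤ m) (hbm : b ≤ m)
    (hnI : nI = (N : Int)) :
    ∀ (fuel i : Nat) (seen : PySem.Dict Nat Nat) (mask? : Option Nat) (w : Nat),
      2 ≤ i → i + fuel = N + 1 →
      (mask? = none → i ≤ m + 1 ∧ w = 0) →
      (∀ mk, mask? = some mk → m + 1 ≤ i ∧ mk = 2 ^ m - 1 ∧
        w = pvEnc ((List.range m).map (fun k => pvF a b (i - m + k)))) →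
      (∀ wk j, seen.get? wk = some j →
        m + 1 ≤ j ∧ j < i ∧ wk = pvEnc ((List.range m).map (fun k => pvF a b (j - m + k)))) →
      properdpAltGo a b m nI N ((List.range i).map (pvF a b)) seen mask? w i fuel = pvF a b N := by
  intro fuel
  induction fuel with
  | zero =>
    intro i seen mask? w h2 hiN _ _ _
    rw [properdpAltGo, hnI, PySem.List.pyGet?_natCast]
    simp [List.getElem?_map, List.getElem?_range, show N < i by omega]
  | succ fuel ih =>
    intro i seen mask? w h2 hiN hmn hms hinv
    by_cases hm : m + 1 ≤ i
    · cases mask? with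
      | none =>
        obtain ⟨_, hw0⟩ := hmn rfl
        subst hw0
        simp only [properdpAltGo, if_pos hm]
        rw [pvWindow (pvF a b) i m (by omega)]
        have hfe : ((List.range m).map (fun k => pvF a b (i - m + k))).foldl
            (fun acc v => 2 * acc + v.toNat) 0 = pvEnc ((List.range m).map (fun k => pvF a b (i - m + k))) := rfl
        rw [hfe]
        cases hget : seen.get? (pvEnc ((List.range m).map (fun k => pvF a b (i - m + k)))) with
        | some j =>
          obtain ⟨hj1, hj2, hwj⟩ := hinv _ j hget
          exact pvHit a b m N i j ha hb ham hbm hj1 hj2 (by omega) hwj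
        | none =>
          rw [pvStepB a b ha hb i h2]
          have hseq : (List.range i).map (pvF a b) ++ [pvF a b i]
              = (List.range (i + 1)).map (pvF a b) := by
            simp [List.range_succ]
          rw [hseq]
          refine ih (i + 1) _ _ _ (by omega) (by omega) (by intro h; cases h) ?_ ?_
          · intro mk hmk'
            injection hmk' with hmk''
            exact ⟨by omega, hmk''.symm, pvEnc_roll a b m i (by omega) (by omega)⟩
          · intro wk j hget'
            rw [PySem.Dict.get?_insert] at hget'
            by_cases hww : wk = pvEnc ((List.range m).map (fun k => pvF a b (i - m + k)))
            · rw [if_pos hww] at hget'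
              have hji : j = i := (Option.some.inj hget').symm
              refine ⟨by omega, by omega, ?_⟩
              rw [hww, hji]
            · rw [if_neg hww] at hget'
              obtain ⟨hA, hB, hC⟩ := hinv wk j hget'
              exact ⟨hA, by omega, hC⟩
      | some mk =>
        obtain ⟨_, hmk, hwE⟩ := hms mk rfl
        subst hmk
        subst hwE
        simp only [properdpAltGo, if_pos hm]
        cases hget : seen.get? (pvEnc ((List.range m).map (fun k => pvF a b (i - m + k)))) with
        | some j =>
          obtain ⟨hj1, hj2, hwj⟩ := hinv _ j hget
          exact pvHit a b m N i j ha hb ham hbm hj1 hj2 (by omega) hwj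
        | none =>
          rw [pvStepB a b ha hb i h2]
          have hseq : (List.range i).map (pvF a b) ++ [pvF a b i]
              = (List.range (i + 1)).map (pvF a b) := by
            simp [List.range_succ]
          rw [hseq]
          refine ih (i + 1) _ _ _ (by omega) (by omega) (by intro h; cases h) ?_ ?_
          · intro mk' hmk'
            injection hmk' with hmk''
            exact ⟨by omega, hmk''.symm, pvEnc_roll a b m i (by omega) (by omega)⟩
          · intro wk j hget'
            rw [PySem.Dict.get?_insert] at hget'
            by_cases hww : wk = pvEnc ((List.range m).map (fun k => pvF a b (i - m + k)))
            · rw [if_pos hww] at hget'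
              have hji : j = i := (Option.some.inj hget').symm
              refine ⟨by omega, by omega, ?_⟩
              rw [hww, hji]
            · rw [if_neg hww] at hget'
              obtain ⟨hA, hB, hC⟩ := hinv wk j hget'
              exact ⟨hA, by omega, hC⟩
    · simp only [properdpAltGo, if_neg hm]
      rw [pvStepB a b ha hb i h2]
      have hseq : (List.range i).map (pvF a b) ++ [pvF a b i]
          = (List.range (i + 1)).map (pvF a b) := by
        simp [List.range_succ]
      rw [hseq]
      refine ih (i + 1) _ _ _ (by omega) (by omega) ?_ ?_ ?_
      · intro h
        exact ⟨by omega, (hmn h).2⟩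
      · intro mk hmk'
        exact absurd (hms mk hmk').1 hm
      · intro wk j hget'
        obtain ⟨hA, hB, hC⟩ := hinv wk j hget'
        exact ⟨hA, by omega, hC⟩

lemma pvB_val (n x y : Int) (hn : 1 ≤ n) (hx : 1 ≤ x) (hy : 1 ≤ y) :
    properdp_alt n x y = pvF x.toNat y.toNat n.toNat := by
  simp only [properdp_alt]
  rw [pvF_init x.toNat y.toNat]
  refine pvGoB x.toNat y.toNat (max x.toNat y.toNat) n.toNat n (by omega) (by omega)
    (le_max_left _ _) (le_max_right _ _) (by omega) (n.toNat + 1 - 2) 2 PySem.Dict.empty none 0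
    (by omega) (by omega) ?_ ?_ ?_
  · intro _; exact ⟨by omega, rfl⟩
  · intro mk h; cases h
  · intro wk j hget
    simp [PySem.Dict.get?_empty] at hget

-- ===== VERDICT (by name: the statement is the Claim_ definition above) =====
theorem properdp_spec : Claim_equal_properdp := by
  intro n x y _ hpre
  obtain ⟨hn, hcase⟩ := hpre
  show properdp n x y = properdp_alt n x y
  rcases hcase with h1 | ⟨hx, hy⟩
  · subst h1; rfl
  · rw [pvA_val n x y hn hx hy, pvB_val n x y hn hx hy]
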